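-- pv_equiv track=rewrite | github.com/CSStudySession/AlgoInPython | TwoPointers/LC1004MaxConsecutiveOnesIII.py | getMaxVacations
-- ===== SOURCE A (Python) =====
-- from typing import List
--
-- def shrink_window(days: List[List[str]], left: List[int]) -> List[int]:
--     row, col = left[0], left[1]
--     if col == len(days[0]) - 1:
--         return [row + 1, 0]
--     return [row, col + 1]
--
-- def getMaxVacations(days: List[List[str]], pto: int) -> int:
--     max_vacation = 0
--     curr_vacation = 0
--     left = [0, 0]
--     for row in range(len(days)):
--         for col in range(len(days[0])):
--             if days[row][col] == 'W':
--                 pto -= 1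
--             curr_vacation += 1
--             while pto < 0: # 收缩左端点
--                 if days[left[0]][left[1]] == 'W':
--                     pto += 1
--                 left = shrink_window(days, left) # 函数返回left下一个在2d矩阵中的点
--                 curr_vacation -= 1
--             max_vacation = max(curr_vacation, max_vacation)
--     return max_vacation
-- ===== SOURCE B (Python) =====
-- def getMaxVacations(days, pto):
--     cols = len(days[0]) if days else 0
--     flat = [days[r][c] for r in range(len(days)) for c in range(cols)]
--     left = 0
--     for cell in flat:
--         if cell == 'W':
--             pto -= 1
--         if pto < 0:
--             if flat[left] == 'W':
--                 pto += 1
--             left += 1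
--     return len(flat) - left
-- ===== Notes on version B (the rewrite author's own statement) =====
-- stated objective: simpler
-- what changed: Replaces A's 2D sliding window ([row,col] left pointer with a shrink_window helper, an inner shrink-while loop and a per-cell max) by flattening the grid once into a 1D row-major list and running a non-shrinking window: a single if per cell, no inner loop, no max; the answer is n - left (constant-factor faster: no per-cell max and no inner while loop, plain 1D indexing).
import Mathlib
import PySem

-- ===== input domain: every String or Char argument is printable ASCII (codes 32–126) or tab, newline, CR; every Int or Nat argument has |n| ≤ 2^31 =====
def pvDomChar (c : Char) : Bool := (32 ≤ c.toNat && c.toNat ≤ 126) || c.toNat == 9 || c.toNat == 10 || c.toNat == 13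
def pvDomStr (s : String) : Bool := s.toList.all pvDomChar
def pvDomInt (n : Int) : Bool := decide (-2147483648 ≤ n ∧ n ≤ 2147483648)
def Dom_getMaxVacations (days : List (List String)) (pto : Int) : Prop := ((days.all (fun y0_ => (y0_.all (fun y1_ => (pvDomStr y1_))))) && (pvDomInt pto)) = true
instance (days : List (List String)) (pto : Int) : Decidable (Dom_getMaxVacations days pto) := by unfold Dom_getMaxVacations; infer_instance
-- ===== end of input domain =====

-- B replaces A's 2D sliding window ([row,col] left pointer, inner shrink-while, per-cell max)
-- by flattening the grid once and running a non-shrinking window (a single if per cell, no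
-- inner loop, no max), returning n - left; objective: simpler.

-- ===== PORT A =====
-- helper shrink_window: advance the 2D left pointer one cell in row-major order
def shrinkWindow (days : List (List String)) (left : Int × Int) : Int × Int :=
  if left.2 == ((days.getD 0 []).length : Int) - 1 then (left.1 + 1, 0) else (left.1, left.2 + 1)

-- the 'while pto < 0' loop of A; fuel only makes the recursion total (on inputs admitted by
-- Pre_ the loop always terminates well before the fuel runs out)
def shrinkLoop (days : List (List String)) : Nat → Int → Int × Int → Int → Int × (Int × Int) × Int
  | 0, pto, left, curr => (pto, left, curr)
  | fuel + 1, pto, left, curr =>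
    if pto < 0 then
      let pto' := if (days.getD left.1.toNat []).getD left.2.toNat "" == "W" then pto + 1 else pto
      shrinkLoop days fuel pto' (shrinkWindow days left) (curr - 1)
    else (pto, left, curr)

-- state tuple: (max_vacation, curr_vacation, pto, left)
def getMaxVacations (days : List (List String)) (pto : Int) : Int :=
  let fin := (PySem.List.pyRange 0 (days.length : Int)).foldl (fun st row =>
    (PySem.List.pyRange 0 ((days.getD 0 []).length : Int)).foldl (fun st col =>
      let pto1 := if (days.getD row.toNat []).getD col.toNat "" == "W" then st.2.2.1 - 1 else st.2.2.1
      let curr1 := st.2.1 + 1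
      let r := shrinkLoop days (days.length * (days.getD 0 []).length + 2) pto1 st.2.2.2 curr1
      (max r.2.2 st.1, r.2.2, r.1, r.2.1)) st)
    ((0 : Int), (0 : Int), pto, ((0 : Int), (0 : Int)))
  fin.1

-- ===== PORT B =====
def getMaxVacations_alt (days : List (List String)) (pto : Int) : Int :=
  let cols : Nat := if days.isEmpty then 0 else (days.headD []).length
  let flat := (PySem.List.pyRange 0 (days.length : Int)).flatMap (fun r =>
    (PySem.List.pyRange 0 (cols : Int)).map (fun c => (days.getD r.toNat []).getD c.toNat ""))
  let fin := flat.foldl (fun (st : Int × Int) cell =>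
    let pto1 := if cell == "W" then st.2 - 1 else st.2
    if pto1 < 0 then
      (st.1 + 1, if flat.getD st.1.toNat "" == "W" then pto1 + 1 else pto1)
    else (st.1, pto1)) (0, pto)
  (flat.length : Int) - fin.1

-- ===== PRECONDITION & SPEC =====
-- Pre_ excludes exactly the inputs where the Python A raises IndexError: grids with a row
-- shorter than row 0 (the scan indexes every row up to len(days[0])), and negative pto with
-- at least one cell (the shrink loop then walks the left pointer off the grid).
def Pre_getMaxVacations (days : List (List String)) (pto : Int) : Prop :=
  (∀ row ∈ days, (days.headD []).length ≤ row.length) ∧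
  (0 ≤ pto ∨ days = [] ∨ days.headD [] = [])
instance (days : List (List String)) (pto : Int) : Decidable (Pre_getMaxVacations days pto) := by
  unfold Pre_getMaxVacations; infer_instance

def pvWitness_getMaxVacations : List (List String) × Int := ([["W", "V"], ["V", "V"]], 1)

def Spec_getMaxVacations (days : List (List String)) (pto : Int) (out : Int) : Prop := out = getMaxVacations_alt days pto
instance (days : List (List String)) (pto : Int) (out : Int) : Decidable (Spec_getMaxVacations days pto out) := by unfold Spec_getMaxVacations; infer_instance

-- ===== CLAIM (what is proved, stated in full; the proofs are below) =====
def Claim_equal_getMaxVacations : Prop := ∀ (days : List (List String)) (pto : Int), Dom_getMaxVacations days pto → Pre_getMaxVacations days pto → Spec_getMaxVacations days pto (getMaxVacations days pto)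

-- ===== LEMMAS AND PROOFS =====

-- abstract view shared by both proofs: the flat row-major cell sequence and its W prefix counts
def pvCols (days : List (List String)) : Nat := (days.getD 0 []).length
def pvN (days : List (List String)) : Nat := days.length * pvCols days
def pvG (days : List (List String)) (i : Nat) : String :=
  (days.getD (i / pvCols days) []).getD (i % pvCols days) ""
def pvL (days : List (List String)) : List String := (List.range (pvN days)).map (pvG days)
def pvPC (days : List (List String)) (i : Nat) : Nat :=
  ((List.range i).map (pvG days)).countP (fun s => s == "W")

-- the per-cell step functions of the two ports, lifted out of the folds
def stepA (days : List (List String)) (st : Int × Int × Int × Int × Int) (x : String) :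
    Int × Int × Int × Int × Int :=
  let pto1 := if x == "W" then st.2.2.1 - 1 else st.2.2.1
  let curr1 := st.2.1 + 1
  let r := shrinkLoop days (days.length * (days.getD 0 []).length + 2) pto1 st.2.2.2 curr1
  (max r.2.2 st.1, r.2.2, r.1, r.2.1)

def stepB (days : List (List String)) (st : Int × Int) (cell : String) : Int × Int :=
  let pto1 := if cell == "W" then st.2 - 1 else st.2
  if pto1 < 0 then
    (st.1 + 1, if (pvL days).getD st.1.toNat "" == "W" then pto1 + 1 else pto1)
  else (st.1, pto1)

lemma flat_eq (days : List (List String)) (R : Nat) :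
    (List.range R).flatMap (fun r => (List.range (pvCols days)).map
      (fun c => (days.getD r []).getD c "")) = (List.range (R * pvCols days)).map (pvG days) := by
  induction R with
  | zero => simp
  | succ R ih =>
    rw [List.range_succ, List.flatMap_append, ih, Nat.succ_mul, List.range_add, List.map_append]
    simp only [List.flatMap_cons, List.flatMap_nil, List.append_nil, List.map_map]
    congr 1
    apply List.map_congr_left
    intro c hc
    rw [List.mem_range] at hc
    have hcols : 0 < pvCols days := by omega
    simp only [Function.comp]
    unfold pvG
    have h1 : R * pvCols days + c = c + pvCols days * R := by ring
    rw [h1, Nat.add_mul_div_left _ _ hcols, Nat.add_mul_mod_self_left,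
      Nat.div_eq_of_lt hc, Nat.mod_eq_of_lt hc, Nat.zero_add]

lemma portA_eq (days : List (List String)) (pto : Int) :
    getMaxVacations days pto
      = (List.foldl (stepA days) (0, 0, pto, 0, 0) (pvL days)).1 := by
  rw [show pvL days = (List.range days.length).flatMap (fun r => (List.range (pvCols days)).map
      (fun c => (days.getD r []).getD c "")) from (flat_eq days days.length).symm,
    List.foldl_flatMap]
  unfold getMaxVacations
  rw [show ((days.getD 0 []).length : Int) = ((pvCols days : Nat) : Int) from rfl,
    PySem.List.pyRange_zero_natCast, PySem.List.pyRange_zero_natCast]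
  simp only [List.foldl_map, Int.toNat_natCast, stepA]
  rfl

lemma portB_eq (days : List (List String)) (pto : Int) :
    getMaxVacations_alt days pto
      = ((pvL days).length : Int) - (List.foldl (stepB days) (0, pto) (pvL days)).1 := by
  cases days with
  | nil => rfl
  | cons d ds =>
    have hflat : (PySem.List.pyRange 0 ((d :: ds).length : Int)).flatMap (fun r =>
        (PySem.List.pyRange 0 (d.length : Int)).map
          (fun c => ((d :: ds).getD r.toNat []).getD c.toNat ""))
        = pvL (d :: ds) := by
      rw [show (d.length : Int) = ((pvCols (d :: ds) : Nat) : Int) from rfl,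
        PySem.List.pyRange_zero_natCast, PySem.List.pyRange_zero_natCast,
        List.flatMap_map]
      simp only [List.map_map, Function.comp_def, Int.toNat_natCast]
      rw [show pvL (d :: ds) = (List.range (d :: ds).length).flatMap (fun r =>
        (List.range (pvCols (d :: ds))).map (fun c => ((d :: ds).getD r []).getD c ""))
        from (flat_eq (d :: ds) (d :: ds).length).symm]
    unfold getMaxVacations_alt
    simp only [List.isEmpty_cons, Bool.false_eq_true, if_false, List.headD_cons]
    rw [hflat]
    rfl

lemma shrinkLoop_nonneg (days : List (List String)) (fuel : Nat) (pto : Int) (left : Int × Int)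
    (curr : Int) (h : 0 ≤ pto) : shrinkLoop days fuel pto left curr = (pto, left, curr) := by
  cases fuel <;> simp [shrinkLoop] <;> omega

lemma div_mod_succ (c q r : Nat) (h : 0 < c) (hr : r < c) :
    ((c * q + r + 1) / c, (c * q + r + 1) % c) = if r = c - 1 then (q + 1, 0) else (q, r + 1) := by
  by_cases he : r = c - 1
  · rw [if_pos he, show c * q + r + 1 = c * (q + 1) from by rw [Nat.mul_add, Nat.mul_one]; omega,
      Nat.mul_div_cancel_left _ h, Nat.mul_mod_right]
  · rw [if_neg he]
    have h2 : r + 1 < c := by omega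
    rw [show c * q + r + 1 = (r + 1) + c * q from by omega,
      Nat.add_mul_div_left _ _ h, Nat.add_mul_mod_self_left,
      Nat.div_eq_of_lt h2, Nat.mod_eq_of_lt h2, Nat.zero_add]

lemma shrinkWindow_succ (days : List (List String)) (l : Nat) (h : 0 < pvCols days) :
    shrinkWindow days (↑(l / pvCols days), ↑(l % pvCols days))
      = (↑((l + 1) / pvCols days), ↑((l + 1) % pvCols days)) := by
  have hmlt : l % pvCols days < pvCols days := Nat.mod_lt _ h
  have key := div_mod_succ (pvCols days) (l / pvCols days) (l % pvCols days) h hmlt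
  rw [Nat.add_comm (pvCols days * (l / pvCols days)) (l % pvCols days), Nat.mod_add_div] at key
  unfold shrinkWindow
  rw [show ((days.getD 0 []).length : Int) = ((pvCols days : Nat) : Int) from rfl]
  by_cases he : l % pvCols days = pvCols days - 1
  · rw [if_pos he] at key
    rw [if_pos (by simp only [beq_iff_eq]; rw [he]; push_cast [Nat.cast_sub (by omega : 1 ≤ pvCols days)]; ring)]
    rw [Prod.mk.injEq] at key
    rw [key.1, key.2]
    simp
  · rw [if_neg he] at key
    rw [if_neg (by simp only [beq_iff_eq]; intro hx; apply he; omega)]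
    rw [Prod.mk.injEq] at key
    rw [key.1, key.2]
    simp

lemma deref_eq (days : List (List String)) (l : Nat) :
    (days.getD ((l / pvCols days : Nat) : Int).toNat []).getD ((l % pvCols days : Nat) : Int).toNat ""
      = pvG days l := by
  rw [Int.toNat_natCast, Int.toNat_natCast]; rfl

lemma shrinkLoop_firstW (days : List (List String)) (k : Nat) :
    ∀ (l fuel : Nat) (curr : Int), 0 < pvCols days →
    (∀ t, t < k → pvG days (l + t) ≠ "W") → pvG days (l + k) = "W" → k + 1 ≤ fuel →
    shrinkLoop days fuel (-1) (↑(l / pvCols days), ↑(l % pvCols days)) curr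
      = (0, (↑((l + k + 1) / pvCols days), ↑((l + k + 1) % pvCols days)), curr - (↑k + 1)) := by
  induction k with
  | zero =>
    intro l fuel curr hc _ hW hfuel
    obtain ⟨f, rfl⟩ : ∃ f, fuel = f + 1 := ⟨fuel - 1, by omega⟩
    show (if (-1 : Int) < 0 then _ else _) = _
    rw [if_pos (by omega)]
    simp only [deref_eq]
    rw [Nat.add_zero] at hW
    rw [hW]
    simp only [beq_self_eq_true, if_true]
    rw [show (-1 : Int) + 1 = 0 from by ring]
    rw [shrinkLoop_nonneg _ _ _ _ _ (le_refl 0), shrinkWindow_succ days l hc]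
    norm_num
  | succ k ih =>
    intro l fuel curr hc hmin hW hfuel
    obtain ⟨f, rfl⟩ : ∃ f, fuel = f + 1 := ⟨fuel - 1, by omega⟩
    show (if (-1 : Int) < 0 then _ else _) = _
    rw [if_pos (by omega)]
    simp only [deref_eq]
    rw [if_neg (by simpa [beq_iff_eq] using hmin 0 (by omega)), shrinkWindow_succ days l hc]
    have h1 : ∀ t, t < k → pvG days (l + 1 + t) ≠ "W" := by
      intro t ht
      have := hmin (t + 1) (by omega)
      rwa [show l + (t + 1) = l + 1 + t from by omega] at this
    have h2 : pvG days (l + 1 + k) = "W" := by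
      rwa [show l + (k + 1) = l + 1 + k from by omega] at hW
    rw [ih (l + 1) f (curr - 1) hc h1 h2 (by omega),
      show l + 1 + k + 1 = l + (k + 1) + 1 from by omega,
      show curr - 1 - (↑k + 1) = curr - (↑(k + 1) + 1) from by push_cast; ring]

lemma pvPC_succ (days : List (List String)) (i : Nat) :
    pvPC days (i + 1) = pvPC days i + (if pvG days i = "W" then 1 else 0) := by
  simp [pvPC, List.range_succ, List.countP_append, List.countP_cons, beq_iff_eq]

lemma pvPC_mono (days : List (List String)) {i j : Nat} (h : i ≤ j) :
    pvPC days i ≤ pvPC days j := by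
  induction j, h using Nat.le_induction with
  | base => exact le_refl _
  | succ j hj ih => rw [pvPC_succ]; split <;> omega

lemma pvPC_const (days : List (List String)) (l : Nat) :
    ∀ k, (∀ t, t < k → pvG days (l + t) ≠ "W") → pvPC days (l + k) = pvPC days l := by
  intro k
  induction k with
  | zero => intro _; rfl
  | succ k ih =>
    intro h
    have h1 : l + (k + 1) = (l + k) + 1 := by omega
    rw [h1, pvPC_succ, if_neg (h k (by omega)), ih (fun t ht => h t (by omega))]
    omega

lemma pvExistsW (days : List (List String)) :
    ∀ (b a : Nat), pvPC days a < pvPC days b → ∃ t, a + t < b ∧ pvG days (a + t) = "W" := by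
  intro b
  induction b with
  | zero => intro a h; simp [pvPC] at h
  | succ b ih =>
    intro a h
    by_cases h1 : pvPC days a < pvPC days b
    · obtain ⟨t, ht, hw⟩ := ih a h1
      exact ⟨t, by omega, hw⟩
    · rw [pvPC_succ] at h
      by_cases hw : pvG days b = "W"
      · have hab : a ≤ b := by
          by_contra hab
          have := pvPC_mono days (show b + 1 ≤ a by omega)
          rw [pvPC_succ] at this
          omega
        refine ⟨b - a, by omega, ?_⟩
        rw [show a + (b - a) = b by omega]
        exact hw
      · rw [if_neg hw] at h; omega

lemma main_inv (days : List (List String)) (pto0 : Int) (h0 : 0 ≤ pto0) :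
    ∀ (i : Nat), i ≤ pvN days →
    ∃ lA lB : Nat, lB ≤ lA ∧ lA ≤ i ∧
      List.foldl (stepA days) (0, 0, pto0, 0, 0) ((List.range i).map (pvG days))
        = ((i : Int) - lB, (i : Int) - lA, pto0 - ((pvPC days i : Int) - pvPC days lA),
            ↑(lA / pvCols days), ↑(lA % pvCols days)) ∧
      List.foldl (stepB days) (0, pto0) ((List.range i).map (pvG days))
        = ((lB : Int), pto0 - ((pvPC days i : Int) - pvPC days lB)) ∧
      ((pvPC days i : Int) - pvPC days lA) ≤ pto0 ∧
      (∀ l : Nat, l < lA → pto0 < ((pvPC days i : Int) - pvPC days l)) := by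
  intro i
  induction i with
  | zero =>
    intro _
    refine ⟨0, 0, le_refl _, le_refl _, by simp [pvPC], by simp [pvPC], by simp [pvPC]; omega,
      fun l hl => absurd hl (by omega)⟩
  | succ i ih =>
    intro hi1
    obtain ⟨lA, lB, hBA, hAi, hA, hB, hle, hmin⟩ := ih (by omega)
    have hc : 0 < pvCols days := by
      rcases Nat.eq_zero_or_pos (pvCols days) with h | h
      · exfalso; unfold pvN at hi1; rw [h, Nat.mul_zero] at hi1; omega
      · exact h
    have hderefB : ∀ m : Nat, m < pvN days → (pvL days).getD ((m : Int)).toNat "" = pvG days m :=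
      fun m hm => by rw [Int.toNat_natCast]; exact PySem.List.getD_map_range _ _ _ _ hm
    have hmonoA : pvPC days lB ≤ pvPC days lA := pvPC_mono days hBA
    have hmonoI : pvPC days lA ≤ pvPC days i := pvPC_mono days hAi
    rw [show (List.range (i+1)).map (pvG days)
        = (List.range i).map (pvG days) ++ [pvG days i] from by rw [List.range_succ, List.map_append]; rfl,
      List.foldl_append, List.foldl_append, hA, hB]
    simp only [List.foldl_cons, List.foldl_nil]
    by_cases hw : pvG days i = "W"
    · have hPC1 : pvPC days (i+1) = pvPC days i + 1 := by rw [pvPC_succ, if_pos hw]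
      by_cases hpa : 1 ≤ pto0 - ((pvPC days i : Int) - pvPC days lA)
      · -- A does not shrink
        by_cases hpb : 1 ≤ pto0 - ((pvPC days i : Int) - pvPC days lB)
        · -- B window also fine: lA = lB
          have hab : lB = lA := by
            by_contra hne
            have := hmin lB (by omega)
            omega
          refine ⟨lA, lA, le_refl _, by omega, ?_, ?_, by rw [hPC1]; push_cast; omega, ?_⟩
          · simp only [stepA, hw, beq_self_eq_true, if_true]
            rw [shrinkLoop_nonneg _ _ _ _ _ (by omega)]
            simp only [Prod.mk.injEq, and_true, true_and]
            push_cast [hPC1]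
            omega
          · simp only [stepB, hw, beq_self_eq_true, if_true]
            rw [if_neg (by rw [hab]; omega)]
            simp only [Prod.mk.injEq, hab, and_true, true_and]
            push_cast [hPC1]
            omega
          · intro l hl
            have := hmin l hl
            rw [hPC1]; push_cast; omega
        · -- B advances its left end by one
          have hab : lB < lA := by
            rcases Nat.lt_or_ge lB lA with hlt | hge
            · exact hlt
            · exfalso
              have heq : lB = lA := by omega
              rw [heq] at hpb
              omega
          have hPCB := pvPC_succ days lB
          refine ⟨lA, lB + 1, by omega, by omega, ?_, ?_, by rw [hPC1]; push_cast; omega, ?_⟩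
          · simp only [stepA, hw, beq_self_eq_true, if_true]
            rw [shrinkLoop_nonneg _ _ _ _ _ (by omega)]
            simp only [Prod.mk.injEq, and_true, true_and]
            push_cast [hPC1]
            omega
          · simp only [stepB, hw, beq_self_eq_true, if_true]
            rw [if_pos (by omega), hderefB lB (by omega)]
            by_cases hwb : pvG days lB = "W"
            · rw [if_pos hwb] at hPCB
              rw [if_pos (by simp [hwb])]
              simp only [Prod.mk.injEq, and_true, true_and]
              push_cast [hPC1, hPCB]
              omega
            · rw [if_neg hwb] at hPCB
              rw [if_neg (by simp [hwb])]
              simp only [Prod.mk.injEq, and_true, true_and]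
              push_cast [hPC1, hPCB]
              omega
          · intro l hl
            have := hmin l hl
            rw [hPC1]; push_cast; omega
      · -- A shrinks: pto has hit -1, pop cells up to and including the first W
        have hpa0 : pto0 - ((pvPC days i : Int) - pvPC days lA) = 0 := by omega
        have hex : ∃ t, pvG days (lA + t) = "W" := by
          obtain ⟨t0, _, ht0W⟩ := pvExistsW days (i + 1) lA (by rw [hPC1]; omega)
          exact ⟨t0, ht0W⟩
        obtain ⟨t0, ht0lt, ht0W⟩ := pvExistsW days (i + 1) lA (by rw [hPC1]; omega)
        have hkW : pvG days (lA + Nat.find hex) = "W" := Nat.find_spec hex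
        have hkmin : ∀ t, t < Nat.find hex → pvG days (lA + t) ≠ "W" :=
          fun t ht => Nat.find_min hex ht
        have hkle : Nat.find hex ≤ t0 := Nat.find_min' hex ht0W
        have hkN : lA + Nat.find hex < i + 1 := by omega
        have hPCk : pvPC days (lA + Nat.find hex) = pvPC days lA := pvPC_const days lA _ hkmin
        have hPCk1 : pvPC days (lA + Nat.find hex + 1) = pvPC days lA + 1 := by
          rw [pvPC_succ, if_pos hkW, hPCk]
        have hPCB := pvPC_succ days lB
        refine ⟨lA + Nat.find hex + 1, lB + 1, by omega, by omega, ?_, ?_, ?_, ?_⟩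
        · simp only [stepA, hw, beq_self_eq_true, if_true]
          rw [show pto0 - ((pvPC days i : Int) - pvPC days lA) - 1 = -1 from by omega,
            show days.length * (days.getD 0 []).length + 2 = pvN days + 2 from rfl,
            shrinkLoop_firstW days (Nat.find hex) lA (pvN days + 2) _ hc hkmin hkW (by omega)]
          simp only [Prod.mk.injEq, and_true, true_and]
          push_cast [hPC1, hPCk1]
          omega
        · simp only [stepB, hw, beq_self_eq_true, if_true]
          rw [if_pos (by omega), hderefB lB (by omega)]
          by_cases hwb : pvG days lB = "W"
          · rw [if_pos hwb] at hPCB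
            rw [if_pos (by simp [hwb])]
            simp only [Prod.mk.injEq, and_true, true_and]
            push_cast [hPC1, hPCB]
            omega
          · rw [if_neg hwb] at hPCB
            rw [if_neg (by simp [hwb])]
            simp only [Prod.mk.injEq, and_true, true_and]
            push_cast [hPC1, hPCB]
            omega
        · rw [hPC1, hPCk1]; push_cast; omega
        · intro l hl
          by_cases hlA : l < lA
          · have := hmin l hlA
            rw [hPC1]; push_cast; omega
          · have h1 : pvPC days lA ≤ pvPC days l := pvPC_mono days (by omega)
            have h2 : pvPC days l ≤ pvPC days (lA + Nat.find hex) := pvPC_mono days (by omega)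
            rw [hPC1]; push_cast; omega
    · -- current cell is not a work day
      have hPC1 : pvPC days (i+1) = pvPC days i := by rw [pvPC_succ, if_neg hw]; omega
      have hbeq : (pvG days i == "W") = false := by simp [hw]
      by_cases hpb : 0 ≤ pto0 - ((pvPC days i : Int) - pvPC days lB)
      · have hab : lB = lA := by
          by_contra hne
          have := hmin lB (by omega)
          omega
        refine ⟨lA, lA, le_refl _, by omega, ?_, ?_, by rw [hPC1]; push_cast; omega, ?_⟩
        · simp only [stepA, hbeq, Bool.false_eq_true, if_false]
          rw [shrinkLoop_nonneg _ _ _ _ _ (by omega)]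
          simp only [Prod.mk.injEq, and_true, true_and]
          push_cast [hPC1]
          omega
        · simp only [stepB, hbeq, Bool.false_eq_true, if_false]
          rw [if_neg (by rw [hab]; omega)]
          simp only [Prod.mk.injEq, hab, and_true, true_and]
          push_cast [hPC1]
          omega
        · intro l hl
          have := hmin l hl
          rw [hPC1]; push_cast; omega
      · have hab : lB < lA := by
          rcases Nat.lt_or_ge lB lA with hlt | hge
          · exact hlt
          · exfalso
            have heq : lB = lA := by omega
            rw [heq] at hpb
            omega
        have hPCB := pvPC_succ days lB
        refine ⟨lA, lB + 1, by omega, by omega, ?_, ?_, by rw [hPC1]; push_cast; omega, ?_⟩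
        · simp only [stepA, hbeq, Bool.false_eq_true, if_false]
          rw [shrinkLoop_nonneg _ _ _ _ _ (by omega)]
          simp only [Prod.mk.injEq, and_true, true_and]
          push_cast [hPC1]
          omega
        · simp only [stepB, hbeq, Bool.false_eq_true, if_false]
          rw [if_pos (by omega), hderefB lB (by omega)]
          by_cases hwb : pvG days lB = "W"
          · rw [if_pos hwb] at hPCB
            rw [if_pos (by simp [hwb])]
            simp only [Prod.mk.injEq, and_true, true_and]
            push_cast [hPC1, hPCB]
            omega
          · rw [if_neg hwb] at hPCB
            rw [if_neg (by simp [hwb])]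
            simp only [Prod.mk.injEq, and_true, true_and]
            push_cast [hPC1, hPCB]
            omega
        · intro l hl
          have := hmin l hl
          rw [hPC1]; push_cast; omega

-- ===== VERDICT (by name: the statement is the Claim_ definition above) =====
theorem getMaxVacations_spec : Claim_equal_getMaxVacations := by
  intro days pto _ hpre
  unfold Spec_getMaxVacations
  rw [portA_eq, portB_eq]
  by_cases hn : pvN days = 0
  · simp [pvL, hn]
  · have h0 : 0 ≤ pto := by
      obtain ⟨_, h2⟩ := hpre
      rcases h2 with h | h | h
      · exact h
      · exfalso; apply hn; simp [pvN, h]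
      · exfalso; apply hn
        cases days with
        | nil => simp [pvN]
        | cons d ds => simp at h; simp [pvN, pvCols, h]
    obtain ⟨lA, lB, _, _, hA, hB, _, _⟩ := main_inv days pto h0 (pvN days) (le_refl _)
    show (List.foldl (stepA days) (0, 0, pto, 0, 0) (pvL days)).1
      = ((pvL days).length : Int) - (List.foldl (stepB days) (0, pto) (pvL days)).1
    unfold pvL
    rw [hA, hB]
    simp
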